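-- pv_equiv track=rewrite | github.com/Pavaka/Pygorithms | pygorithms/simplex_method_LP.py | _calculate_Xb
-- ===== SOURCE A (Python) =====
-- def _calculate_Xb(matrix_A):
--     matrix_rows = len(matrix_A)
--     matrix_columns = len(matrix_A[0])
--     Xb = []
--     add_item_flag = False
--     for i in range(matrix_rows):
--         for j in range(matrix_columns):
--
--             if matrix_A[i][j] > 0:
--                 for index in range(0, matrix_rows):
--                     if index == i:
--                         continue
--                     if matrix_A[index][j] != 0:
--                         add_item_flag = False
--                         break
--                     add_item_flag = True
--                 if add_item_flag and len(Xb) < matrix_rows: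
--                     Xb.append(j)
--     return Xb
-- ===== SOURCE B (Python) =====
-- def _calculate_Xb(matrix_A):
--     rows = len(matrix_A)
--     cols = len(matrix_A[0])
--     nonzeros = [sum(1 for row in matrix_A if row[j] != 0) for j in range(cols)]
--     Xb = []
--     for row in matrix_A:
--         for j in range(cols):
--             if row[j] > 0 and nonzeros[j] == 1 and len(Xb) < rows:
--                 Xb.append(j)
--     return Xb
-- ===== Notes on version B (the rewrite author's own statement) =====
-- stated objective: alternative
-- what changed: B precomputes per-column nonzero counts once and tests each positive entry with an O(1) count lookup, instead of A's inner verification scan over all rows with a threaded add_item_flag.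
-- intended difference: On 1-row matrices containing a positive entry A returns [] (its add_item_flag can never be set because the verification loop has no other row to visit), while B returns the positive unit columns (capped at rows entries), which is the intended behaviour of the basic-column test. — e.g. on _calculate_Xb([[1]]): A returns [], B returns [0]
-- outside the precondition, e.g. on _calculate_Xb([]): A raises IndexError, B raises IndexError
import Mathlib
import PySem

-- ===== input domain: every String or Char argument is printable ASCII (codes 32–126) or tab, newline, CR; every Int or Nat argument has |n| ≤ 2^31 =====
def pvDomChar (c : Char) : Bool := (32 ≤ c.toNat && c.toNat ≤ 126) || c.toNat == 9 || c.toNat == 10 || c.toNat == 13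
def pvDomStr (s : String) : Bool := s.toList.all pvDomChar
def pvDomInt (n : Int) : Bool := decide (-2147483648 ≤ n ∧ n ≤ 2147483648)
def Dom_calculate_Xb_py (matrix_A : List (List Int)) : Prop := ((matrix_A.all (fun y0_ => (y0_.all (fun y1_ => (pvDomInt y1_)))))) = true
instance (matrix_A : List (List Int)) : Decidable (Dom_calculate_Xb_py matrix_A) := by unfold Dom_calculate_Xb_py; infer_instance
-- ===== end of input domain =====

-- B replaces A's per-entry inner verification scan (with its threaded add_item_flag) by
-- per-column nonzero counts precomputed once (objective: alternative).

-- ===== PORT A =====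
-- 'for index in range(0, matrix_rows): …' with continue/break, threading add_item_flag
def pvLoopIdx (mat : List (List Int)) (i j : Nat) : List Nat → Bool → Bool
  | [], flag => flag
  | idx :: rest, flag =>
    if idx = i then pvLoopIdx mat i j rest flag
    else if ((mat.getD idx []).getD j 0) ≠ 0 then false
    else pvLoopIdx mat i j rest true

-- 'for j in range(matrix_columns): …', state (Xb, add_item_flag)
def pvLoopJ (mat : List (List Int)) (rows i : Nat) : List Nat → (List Int × Bool) → (List Int × Bool)
  | [], s => s
  | j :: rest, (Xb, flag) =>
    if 0 < ((mat.getD i []).getD j 0) then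
      let flag' := pvLoopIdx mat i j (List.range rows) flag
      let Xb' := if flag' ∧ Xb.length < rows then Xb ++ [(j : Int)] else Xb
      pvLoopJ mat rows i rest (Xb', flag')
    else pvLoopJ mat rows i rest (Xb, flag)

-- 'for i in range(matrix_rows): …'
def pvLoopI (mat : List (List Int)) (rows cols : Nat) : List Nat → (List Int × Bool) → (List Int × Bool)
  | [], s => s
  | i :: rest, s => pvLoopI mat rows cols rest (pvLoopJ mat rows i (List.range cols) s)

def calculate_Xb_py (matrix_A : List (List Int)) : List Int :=
  let matrix_rows := matrix_A.length
  let matrix_columns := (matrix_A.headD []).length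
  (pvLoopI matrix_A matrix_rows matrix_columns (List.range matrix_rows) ([], false)).1

-- ===== PORT B =====
def calculate_Xb_py_alt (matrix_A : List (List Int)) : List Int :=
  let rows := matrix_A.length
  let cols := (matrix_A.headD []).length
  let nonzeros := (List.range cols).map (fun j => matrix_A.countP (fun row => row.getD j 0 != 0))
  matrix_A.foldl (fun (Xb : List Int) (row : List Int) =>
    (List.range cols).foldl (fun (Xb : List Int) (j : Nat) =>
      if 0 < row.getD j 0 ∧ nonzeros.getD j 0 = 1 ∧ Xb.length < rows then Xb ++ [(j : Int)] else Xb)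
      Xb) []

-- ===== PRECONDITION & SPEC =====
-- Pre_ excludes exactly the inputs on which A raises IndexError: the empty matrix
-- (matrix_A[0]) and matrices with a row shorter than row 0 (A indexes every row at
-- every column index of row 0).
def Pre_calculate_Xb_py (matrix_A : List (List Int)) : Prop :=
  matrix_A ≠ [] ∧ ∀ row ∈ matrix_A, (matrix_A.headD []).length ≤ row.length
instance (matrix_A : List (List Int)) : Decidable (Pre_calculate_Xb_py matrix_A) := by
  unfold Pre_calculate_Xb_py; infer_instance

def pvWitness_calculate_Xb_py : List (List Int) := [[1, 0], [0, 1]]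

-- On 1-row matrices containing a positive entry A returns [] (add_item_flag can never be set:
-- the verification loop has no other row to visit), while B returns the positive unit columns
-- (capped at rows entries), the intended behaviour of the basic-column test.
def D_calculate_Xb_py (matrix_A : List (List Int)) : Prop :=
  matrix_A.length = 1 ∧ ∃ x ∈ matrix_A.headD [], 0 < x
instance (matrix_A : List (List Int)) : Decidable (D_calculate_Xb_py matrix_A) := by
  unfold D_calculate_Xb_py; infer_instance

def Spec_calculate_Xb_py (matrix_A : List (List Int)) (out : List Int) : Prop :=
  ¬ D_calculate_Xb_py matrix_A → out = calculate_Xb_py_alt matrix_A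
instance (matrix_A : List (List Int)) (out : List Int) : Decidable (Spec_calculate_Xb_py matrix_A out) := by
  unfold Spec_calculate_Xb_py; infer_instance

def pvDiffWitness_calculate_Xb_py : List (List Int) := [[1]]
def pvDiffWitnessOut_calculate_Xb_py : (List Int) × (List Int) := ([], [0])

-- ===== CLAIM (what is proved, stated in full; the proofs are below) =====
def Claim_unchanged_calculate_Xb_py : Prop := ∀ (matrix_A : List (List Int)), Dom_calculate_Xb_py matrix_A → Pre_calculate_Xb_py matrix_A → Spec_calculate_Xb_py matrix_A (calculate_Xb_py matrix_A)
def Claim_changed_calculate_Xb_py : Prop := Dom_calculate_Xb_py (pvDiffWitness_calculate_Xb_py) ∧ Pre_calculate_Xb_py (pvDiffWitness_calculate_Xb_py) ∧ D_calculate_Xb_py (pvDiffWitness_calculate_Xb_py) ∧ calculate_Xb_py (pvDiffWitness_calculate_Xb_py) = pvDiffWitnessOut_calculate_Xb_py.1 ∧ calculate_Xb_py_alt (pvDiffWitness_calculate_Xb_py) = pvDiffWitnessOut_calculate_Xb_py.2 ∧ pvDiffWitnessOut_calculate_Xb_py.1 ≠ pvDiffWitnessOut_calculate_Xb_py.2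
def Claim_exact_calculate_Xb_py : Prop := ∀ (matrix_A : List (List Int)), Dom_calculate_Xb_py matrix_A → Pre_calculate_Xb_py matrix_A → D_calculate_Xb_py matrix_A → calculate_Xb_py matrix_A ≠ calculate_Xb_py_alt matrix_A

-- ===== LEMMAS AND PROOFS =====

theorem pvLoopIdx_all_eq (mat : List (List Int)) (i j : Nat) (l : List Nat) (flag : Bool)
    (h : ∀ k ∈ l, k = i) : pvLoopIdx mat i j l flag = flag := by
  induction l with
  | nil => rfl
  | cons a rest ih =>
    have ha : a = i := h a (by simp)
    simp [pvLoopIdx, ha]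
    exact ih (fun k hk => h k (by simp [hk]))

theorem pvLoopIdx_char (mat : List (List Int)) (i j : Nat) (l : List Nat)
    (h : ∃ k ∈ l, k ≠ i) (flag : Bool) :
    pvLoopIdx mat i j l flag
      = l.all (fun k => k == i || ((mat.getD k []).getD j 0 == 0)) := by
  induction l generalizing flag with
  | nil => simp at h
  | cons a rest ih =>
    by_cases ha : a = i
    · subst ha
      have h' : ∃ k ∈ rest, k ≠ a := by
        obtain ⟨k, hk, hne⟩ := h
        rcases List.mem_cons.1 hk with rfl | hk'
        · exact absurd rfl hne
        · exact ⟨k, hk', hne⟩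
      simp [pvLoopIdx, ih h']
    · by_cases hz : ((mat.getD a []).getD j 0) = 0
      · by_cases h' : ∃ k ∈ rest, k ≠ i
        · simp only [List.getD_eq_getElem?_getD] at hz
          simp [pvLoopIdx, ha, hz, ih h']
        · have h'' : ∀ k ∈ rest, k = i := by
            intro k hk
            by_contra hne
            exact h' ⟨k, hk, hne⟩
          have hall : rest.all (fun k => k == i || ((mat.getD k []).getD j 0 == 0)) = true := by
            simp only [List.all_eq_true]
            intro k hk
            simp [h'' k hk]
          simp only [List.getD_eq_getElem?_getD] at hz
          simp [pvLoopIdx, ha, hz, pvLoopIdx_all_eq mat i j rest true h'']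
          intro x hx
          exact Or.inl (h'' x hx)
      · simp only [List.getD_eq_getElem?_getD] at hz
        simp [pvLoopIdx, ha, hz]

/-- The abstract per-(i,j) step of A's j-loop (rows ≥ 2). -/
def pvStepA (mat : List (List Int)) (rows i : Nat) (Xb : List Int) (j : Nat) : List Int :=
  if 0 < ((mat.getD i []).getD j 0)
      ∧ ((List.range rows).all (fun k => k == i || ((mat.getD k []).getD j 0 == 0)) = true)
      ∧ Xb.length < rows
  then Xb ++ [(j : Int)] else Xb

theorem pvLoopJ_eq_foldl (mat : List (List Int)) (rows i : Nat) (h2 : 2 ≤ rows)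
    (l : List Nat) (Xb : List Int) (flag : Bool) :
    (pvLoopJ mat rows i l (Xb, flag)).1 = l.foldl (pvStepA mat rows i) Xb := by
  have hex : ∃ k ∈ List.range rows, k ≠ i := by
    by_cases hi : i = 0
    · exact ⟨1, by simp [List.mem_range]; omega, by omega⟩
    · exact ⟨0, by simp [List.mem_range]; omega, fun h => hi h.symm⟩
  induction l generalizing Xb flag with
  | nil => rfl
  | cons j rest ih =>
    simp only [List.foldl_cons]
    by_cases hp : 0 < ((mat.getD i []).getD j 0)
    · simp only [pvLoopJ, if_pos hp]
      rw [pvLoopIdx_char mat i j (List.range rows) hex flag, ih]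
      congr 1
      unfold pvStepA
      apply if_congr _ rfl rfl
      simp only [List.all_eq_true, List.mem_range, Bool.or_eq_true, beq_iff_eq]
      tauto
    · simp only [pvLoopJ, if_neg hp]
      rw [ih]
      congr 1
      unfold pvStepA
      rw [if_neg (by tauto)]

theorem pvLoopI_eq_foldl (mat : List (List Int)) (rows cols : Nat) (h2 : 2 ≤ rows)
    (l : List Nat) (s : List Int × Bool) :
    (pvLoopI mat rows cols l s).1
      = l.foldl (fun Xb i => (List.range cols).foldl (pvStepA mat rows i) Xb) s.1 := by
  induction l generalizing s with
  | nil => rfl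
  | cons i rest ih =>
    obtain ⟨Xb, flag⟩ := s
    simp only [pvLoopI, List.foldl_cons]
    rw [ih]
    congr 1
    exact pvLoopJ_eq_foldl mat rows i h2 (List.range cols) Xb flag

/-- A fold over a list equals the fold over its indices reading with getD. -/
theorem pvFoldl_indices {α β : Type} (d : α) (f : β → α → β) (l : List α) (b : β) :
    l.foldl f b = (List.range l.length).foldl (fun s i => f s (l.getD i d)) b := by
  induction l generalizing b with
  | nil => rfl
  | cons a t ih =>
    simp only [List.foldl_cons, List.length_cons, List.range_succ_eq_map, List.foldl_cons,
      List.foldl_map, List.getD_cons_zero, List.getD_cons_succ]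
    exact ih (f b a)

theorem pvNonzeros_getD (mat : List (List Int)) (cols j : Nat) (hj : j < cols) :
    ((List.range cols).map (fun j => mat.countP (fun row => row.getD j 0 != 0))).getD j 0
      = mat.countP (fun row => row.getD j 0 != 0) := by
  simp [List.getD_eq_getElem?_getD, List.getElem?_map, List.getElem?_range, hj]

theorem pvGetD_mem {α : Type} (l : List α) (d : α) {k : Nat} (h : k < l.length) :
    l.getD k d ∈ l := by
  rw [List.getD_eq_getElem?_getD, List.getElem?_eq_getElem h]
  exact List.getElem_mem h

theorem pvCountP_one_iff {α : Type} (p : α → Bool) (d : α) (l : List α) (i : Nat)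
    (hi : i < l.length) (hp : p (l.getD i d) = true) :
    (l.countP p = 1) ↔ ∀ k, k < l.length → k ≠ i → p (l.getD k d) = false := by
  induction l generalizing i with
  | nil => simp at hi
  | cons a t ih =>
    cases i with
    | zero =>
      simp only [List.getD_cons_zero] at hp
      rw [List.countP_cons, if_pos hp]
      constructor
      · intro h k hk hk0
        have ht : t.countP p = 0 := by omega
        obtain ⟨k', rfl⟩ : ∃ k', k = k' + 1 := ⟨k - 1, by omega⟩
        have : t.getD k' d ∈ t := pvGetD_mem t d (by simpa using hk)
        simpa using (List.countP_eq_zero.1 ht _ this)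
      · intro h
        have ht : t.countP p = 0 := by
          rw [List.countP_eq_zero]
          intro x hx
          obtain ⟨k', hk', rfl⟩ := List.mem_iff_getElem.1 hx
          have h2 := h (k' + 1) (by simpa using hk') (by omega)
          rw [List.getD_cons_succ, List.getD_eq_getElem?_getD, List.getElem?_eq_getElem hk'] at h2
          simpa using h2
        omega
    | succ i' =>
      simp only [List.getD_cons_succ] at hp
      have hi' : i' < t.length := by simpa using hi
      by_cases hpa : p a = true
      · rw [List.countP_cons, if_pos hpa]
        have hpos : 0 < t.countP p :=
          List.countP_pos_iff.2 ⟨t.getD i' d, pvGetD_mem t d hi', hp⟩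
        constructor
        · intro h; omega
        · intro h
          have := h 0 (by simp) (by omega)
          simp [List.getD_cons_zero, hpa] at this
      · rw [List.countP_cons, if_neg (by simp [hpa]), Nat.add_zero]
        rw [ih i' hi' hp]
        constructor
        · intro h k hk hki
          cases k with
          | zero => simpa [List.getD_cons_zero] using hpa
          | succ k' =>
            simpa [List.getD_cons_succ] using h k' (by simpa using hk) (by omega)
        · intro h k hk hki
          simpa [List.getD_cons_succ] using h (k + 1) (by simpa using hk) (by omega)

/-- Both per-entry conditions coincide (entry positive → unit column ↔ column count 1). -/
theorem pvCond_iff (mat : List (List Int)) (i j : Nat) (hi : i < mat.length)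
    (hp : 0 < (mat.getD i []).getD j 0) :
    (((List.range mat.length).all (fun k => k == i || ((mat.getD k []).getD j 0 == 0))) = true)
      ↔ mat.countP (fun row => row.getD j 0 != 0) = 1 := by
  have hpne : ((mat.getD i []).getD j 0 != 0) = true := by
    simp only [bne_iff_ne, ne_eq]
    omega
  rw [pvCountP_one_iff (fun row => row.getD j 0 != 0) [] mat i hi hpne]
  simp only [List.all_eq_true, List.mem_range, Bool.or_eq_true, beq_iff_eq,
    bne_eq_false_iff_eq]
  constructor
  · intro h k hk hki
    rcases h k hk with h1 | h2
    · exact absurd h1 hki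
    · exact h2
  · intro h k hk
    by_cases hki : k = i
    · exact Or.inl hki
    · exact Or.inr (h k hk hki)

/-- A fold whose step never fires returns its accumulator. -/
theorem pvFoldl_id {α β : Type} (f : β → α → β) (l : List α)
    (h : ∀ x ∈ l, ∀ b, f b x = b) (b : β) : l.foldl f b = b := by
  induction l generalizing b with
  | nil => rfl
  | cons a t ih =>
    rw [List.foldl_cons, h a (by simp), ih (fun x hx b' => h x (by simp [hx]) b')]

/-- With a single row, A's j-loop leaves the (Xb,false) state untouched. -/
theorem pvLoopJ_one (mat : List (List Int)) (l : List Nat) (Xb : List Int) :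
    pvLoopJ mat 1 0 l (Xb, false) = (Xb, false) := by
  induction l with
  | nil => rfl
  | cons j rest ih =>
    by_cases hp : 0 < ((mat.getD 0 []).getD j 0)
    · have hidx : pvLoopIdx mat 0 j (List.range 1) false = false := by
        rw [List.range_one]
        simp [pvLoopIdx]
      simp only [pvLoopJ, if_pos hp, hidx, Bool.false_eq_true, false_and, if_false]
      exact ih
    · simp only [pvLoopJ, if_neg hp]
      exact ih

theorem pvFoldl_length_le (rows : Nat) (row : List Int) (nz : List Nat) (l : List Nat)
    (Xb : List Int) :
    Xb.length ≤ (l.foldl (fun Xb j =>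
      if 0 < row.getD j 0 ∧ nz.getD j 0 = 1 ∧ Xb.length < rows
      then Xb ++ [(j : Int)] else Xb) Xb).length := by
  induction l generalizing Xb with
  | nil => simp
  | cons j rest ih =>
    simp only [List.foldl_cons]
    split
    · calc Xb.length ≤ (Xb ++ [(j : Int)]).length := by simp
        _ ≤ _ := ih (Xb ++ [(j : Int)])
    · exact ih Xb

theorem pvFoldl_ne_nil (rows : Nat) (hr : 0 < rows) (row : List Int) (nz : List Nat)
    (l : List Nat) (Xb : List Int)
    (h : ∃ j ∈ l, 0 < row.getD j 0 ∧ nz.getD j 0 = 1) :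
    0 < (l.foldl (fun Xb j =>
      if 0 < row.getD j 0 ∧ nz.getD j 0 = 1 ∧ Xb.length < rows
      then Xb ++ [(j : Int)] else Xb) Xb).length := by
  induction l generalizing Xb with
  | nil => simp at h
  | cons j rest ih =>
    simp only [List.foldl_cons]
    by_cases hx : 0 < Xb.length
    · have := pvFoldl_length_le rows row nz rest
        (if 0 < row.getD j 0 ∧ nz.getD j 0 = 1 ∧ Xb.length < rows then Xb ++ [(j : Int)] else Xb)
      have hlen : Xb.length ≤ (if 0 < row.getD j 0 ∧ nz.getD j 0 = 1 ∧ Xb.length < rows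
          then Xb ++ [(j : Int)] else Xb).length := by
        split <;> simp
      omega
    · have hx0 : Xb.length = 0 := by omega
      by_cases hj : 0 < row.getD j 0 ∧ nz.getD j 0 = 1
      · have hcond : 0 < row.getD j 0 ∧ nz.getD j 0 = 1 ∧ Xb.length < rows :=
          ⟨hj.1, hj.2, by omega⟩
        rw [if_pos hcond]
        have := pvFoldl_length_le rows row nz rest (Xb ++ [(j : Int)])
        have hlen : (Xb ++ [(j : Int)]).length = Xb.length + 1 := by simp
        omega
      · have : ∃ j' ∈ rest, 0 < row.getD j' 0 ∧ nz.getD j' 0 = 1 := by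
          obtain ⟨j', hj', hc⟩ := h
          rcases List.mem_cons.1 hj' with rfl | hm
          · exact absurd hc hj
          · exact ⟨j', hm, hc⟩
        rw [if_neg (by tauto)]
        exact ih Xb this

-- ===== VERDICT (by name: the statement is the Claim_ definition above) =====
theorem calculate_Xb_py_spec : Claim_unchanged_calculate_Xb_py := by
  intro mat _hdom hpre
  unfold Spec_calculate_Xb_py
  intro hnd
  obtain ⟨hne, _hrect⟩ := hpre
  rcases Nat.lt_or_ge mat.length 2 with hlt | h2
  · -- one row: A returns Xb unchanged ([]), B's condition never fires
    have h0 : mat.length ≠ 0 := fun h => hne (List.length_eq_zero_iff.1 h)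
    have h1 : mat.length = 1 := by omega
    obtain ⟨r, rfl⟩ := List.length_eq_one_iff.1 h1
    have hnop : ∀ x ∈ r, x ≤ 0 := by
      intro x hx
      by_contra hpos
      exact hnd ⟨by simp, x, by simpa using hx, by omega⟩
    have hA : calculate_Xb_py [r] = [] := by
      unfold calculate_Xb_py
      show (pvLoopI [r] 1 ([r].headD []).length (List.range 1) ([], false)).1 = []
      rw [List.range_one]
      show (pvLoopI [r] 1 ([r].headD []).length []
        (pvLoopJ [r] 1 0 (List.range ([r].headD []).length) ([], false))).1 = []
      rw [pvLoopJ_one]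
      rfl
    have hB : calculate_Xb_py_alt [r] = [] := by
      unfold calculate_Xb_py_alt
      simp only [List.foldl_cons, List.foldl_nil]
      rw [pvFoldl_id]
      intro j _hj Xb
      rw [if_neg]
      rintro ⟨hpos, -, -⟩
      rcases Nat.lt_or_ge j r.length with hl | hge
      · have := hnop _ (pvGetD_mem r 0 hl)
        omega
      · rw [List.getD_eq_default _ _ hge] at hpos
        exact absurd hpos (by norm_num)
    rw [hA, hB]
  · -- at least two rows
    unfold calculate_Xb_py calculate_Xb_py_alt
    simp only []
    rw [pvLoopI_eq_foldl mat mat.length (mat.headD []).length h2]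
    rw [pvFoldl_indices [] _ mat []]
    apply PySem.List.foldl_congr_mem
    intro Xb i hi
    apply PySem.List.foldl_congr_mem
    intro Xb' j hj
    have hi' : i < mat.length := List.mem_range.1 hi
    have hj' : j < (mat.headD []).length := List.mem_range.1 hj
    unfold pvStepA
    by_cases hp : 0 < ((mat.getD i []).getD j 0)
    · rw [pvNonzeros_getD mat _ j hj']
      by_cases hc : mat.countP (fun row => row.getD j 0 != 0) = 1
      · have hall := (pvCond_iff mat i j hi' hp).2 hc
        simp only [hp, hall, hc, true_and, and_true]
      · have hall : ¬ (((List.range mat.length).all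
            (fun k => k == i || ((mat.getD k []).getD j 0 == 0))) = true) :=
          fun h => hc ((pvCond_iff mat i j hi' hp).1 h)
        rw [if_neg (by tauto), if_neg (by tauto)]
    · rw [if_neg (by tauto), if_neg (by tauto)]

theorem calculate_Xb_py_changed : Claim_changed_calculate_Xb_py := by
  unfold Claim_changed_calculate_Xb_py; decide

theorem calculate_Xb_py_tight : Claim_exact_calculate_Xb_py := by
  intro mat _hdom hpre hd heq
  obtain ⟨h1, hx⟩ := hd
  obtain ⟨r, rfl⟩ := List.length_eq_one_iff.1 h1
  -- A's value is []
  have hA : calculate_Xb_py [r] = [] := by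
    unfold calculate_Xb_py
    simp only [List.length_cons, List.length_nil]
    rw [show List.range 1 = [0] from rfl]
    simp [pvLoopI, pvLoopJ_one]
  -- B's value is nonempty
  obtain ⟨x, hxr, hxpos⟩ := (by simpa using hx : ∃ x ∈ r, 0 < x)
  obtain ⟨j, hjlt, rfl⟩ := List.mem_iff_getElem.1 hxr
  have hB : 0 < (calculate_Xb_py_alt [r]).length := by
    unfold calculate_Xb_py_alt
    simp only [List.length_cons, List.length_nil, List.headD_cons, List.foldl_cons,
      List.foldl_nil]
    apply pvFoldl_ne_nil 1 (by omega)
    refine ⟨j, List.mem_range.2 hjlt, ?_, ?_⟩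
    · simp only [List.getD_eq_getElem?_getD, List.getElem?_eq_getElem hjlt, Option.getD_some]
      exact hxpos
    · rw [pvNonzeros_getD [r] r.length j hjlt]
      have hne0 : ¬ r[j]?.getD 0 = 0 := by
        rw [List.getElem?_eq_getElem hjlt, Option.getD_some]
        omega
      simp [List.countP_cons, List.getD_eq_getElem?_getD, hne0]
  rw [← heq, hA] at hB
  simp at hB
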